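-- pv_equiv track=rewrite | github.com/jnimeroff/bookbot | main.py | character_count
-- ===== SOURCE A (Python) =====
-- def character_count(words):
--     cc = {}
--     lowercase_words = words.lower()
--     for character in lowercase_words:
--         if character.isalpha():
--             if character in cc:
--                 cc[character] += 1
--             else:
--                 cc[character] = 1
--     return(cc)
-- ===== SOURCE B (Python) =====
-- def character_count(words):
--     low = words.lower()
--     return {ch: low.count(ch) for ch in dict.fromkeys(low) if ch.isalpha()}
-- ===== Notes on version B (the rewrite author's own statement) =====
-- stated objective: faster
-- what changed: Replaces A's single accumulating per-character dict pass with a build-the-keys-then-rescan strategy: dedupe the lowercased string once (dict.fromkeys) and count each distinct alphabetic character with str.count (constant-factor win: C-level scans instead of a per-character Python loop).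
import Mathlib
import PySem

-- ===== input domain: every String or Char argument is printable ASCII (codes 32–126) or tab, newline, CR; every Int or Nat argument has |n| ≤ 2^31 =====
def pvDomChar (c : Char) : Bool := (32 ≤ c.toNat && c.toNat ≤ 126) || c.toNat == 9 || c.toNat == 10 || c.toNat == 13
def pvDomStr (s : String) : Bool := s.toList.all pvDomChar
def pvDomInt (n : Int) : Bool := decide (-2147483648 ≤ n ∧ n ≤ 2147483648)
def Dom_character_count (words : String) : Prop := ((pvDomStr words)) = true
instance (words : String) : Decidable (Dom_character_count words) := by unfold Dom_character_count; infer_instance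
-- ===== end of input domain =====

-- B rebuilds the dict by counting each distinct alphabetic character with str.count
-- instead of A's single accumulating pass; same return value on every input.

-- ===== PORT A =====
def character_count (words : String) : List (String × Int) :=
  let lowercase_words := (PySem.Str.lower words).toList
  (lowercase_words.foldl (fun cc character =>
    if PySem.Chars.isalpha character then
      if cc.contains (String.singleton character) then
        cc.insert (String.singleton character) (cc.getD (String.singleton character) 0 + 1)
      else
        cc.insert (String.singleton character) 1
    else cc) (PySem.Dict.empty : PySem.Dict String Int)).items

-- ===== PORT B =====
def character_count_alt (words : String) : List (String × Int) :=
  let low := (PySem.Str.lower words).toList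
  (PySem.List.dedup low).filterMap (fun ch =>
    if PySem.Chars.isalpha ch then
      some (String.singleton ch, (low.count ch : Int))
    else none)

-- ===== PRECONDITION & SPEC =====
def Spec_character_count (words : String) (out : List (String × Int)) : Prop := out = character_count_alt words
instance (words : String) (out : List (String × Int)) : Decidable (Spec_character_count words out) := by unfold Spec_character_count; infer_instance

-- ===== CLAIM (what is proved, stated in full; the proofs are below) =====
def Claim_equal_character_count : Prop := ∀ (words : String), Dom_character_count words → Spec_character_count words (character_count words)

-- ===== LEMMAS AND PROOFS =====

theorem cc_step_eq (cc : PySem.Dict String Int) (c : Char) :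
    (if PySem.Chars.isalpha c then
      if cc.contains (String.singleton c) then
        cc.insert (String.singleton c) (cc.getD (String.singleton c) 0 + 1)
      else cc.insert (String.singleton c) 1
    else cc)
    = (if PySem.Chars.isalpha c then
        cc.insert (String.singleton c) (cc.getD (String.singleton c) 0 + 1) else cc) := by
  by_cases h : PySem.Chars.isalpha c = true
  · simp only [h, if_true]
    by_cases hc : cc.contains (String.singleton c) = true
    · simp [hc]
    · simp only [Bool.not_eq_true] at hc
      rw [PySem.Dict.getD_of_not_contains _ _ hc]
      simp [hc]
  · simp [h]

theorem filterMap_if_eq_map_filter {α β : Type} (p : α → Bool) (g : α → β) (l : List α) :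
    l.filterMap (fun x => if p x then some (g x) else none) = (l.filter p).map g := by
  induction l with
  | nil => rfl
  | cons x xs ih =>
    by_cases h : p x = true
    · simp [List.filterMap_cons, List.filter_cons, h, ih]
    · simp [List.filterMap_cons, List.filter_cons, h, ih]

theorem ofList_map_inj {α β : Type} [DecidableEq α] [DecidableEq β]
    (f : α → β) (hf : Function.Injective f) (l : List α) :
    PySem.Set.ofList (l.map f) = (PySem.Set.ofList l).map f := by
  induction l using List.reverseRecOn with
  | nil => rfl
  | append_singleton xs x ih =>
    rw [List.map_append, List.map_singleton, PySem.Set.ofList_append_singleton,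
      PySem.Set.ofList_append_singleton, ih, PySem.Set.add_eq_ite, PySem.Set.add_eq_ite]
    by_cases hm : x ∈ PySem.Set.ofList xs
    · simp [hm, List.mem_map.mpr ⟨x, hm, rfl⟩]
    · have : f x ∉ (PySem.Set.ofList xs).map f := by
        intro hcon
        obtain ⟨y, hy, hyx⟩ := List.mem_map.mp hcon
        exact hm (hf hyx ▸ hy)
      simp [hm, this]

theorem ofList_filter {α : Type} [DecidableEq α] (p : α → Bool) (l : List α) :
    PySem.Set.ofList (l.filter p) = (PySem.Set.ofList l).filter p := by
  induction l using List.reverseRecOn with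
  | nil => rfl
  | append_singleton xs x ih =>
    by_cases h : p x = true
    · rw [List.filter_append, List.filter_singleton, h, cond_true, PySem.Set.ofList_append_singleton,
        PySem.Set.ofList_append_singleton, ih, PySem.Set.add_eq_ite, PySem.Set.add_eq_ite]
      by_cases hm : x ∈ PySem.Set.ofList xs
      · simp [hm, List.mem_filter.mpr ⟨hm, h⟩]
      · have : x ∉ (PySem.Set.ofList xs).filter p := fun hc => hm (List.mem_filter.mp hc).1
        simp [hm, this, List.filter_append, h]
    · have hf : p x = false := by simp [h]
      rw [List.filter_append, List.filter_singleton, hf, cond_false, List.append_nil, ih,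
        PySem.Set.ofList_append_singleton, PySem.Set.add_eq_ite]
      by_cases hm : x ∈ PySem.Set.ofList xs
      · simp [hm]
      · simp [hm, List.filter_append, h]

theorem singleton_injective : Function.Injective String.singleton := by
  intro a b h
  have : (String.singleton a).toList = (String.singleton b).toList := by rw [h]
  simpa [String.singleton] using this

-- ===== VERDICT (by name: the statement is the Claim_ definition above) =====
theorem character_count_spec : Claim_equal_character_count := by
  intro words _
  unfold Spec_character_count character_count character_count_alt
  set low := (PySem.Str.lower words).toList with hlow
  simp only
  rw [PySem.List.foldl_congr_mem low _ (fun cc c =>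
        if PySem.Chars.isalpha c then
          cc.insert (String.singleton c) (cc.getD (String.singleton c) 0 + 1) else cc)
      PySem.Dict.empty (fun cc c _ => cc_step_eq cc c),
    PySem.List.foldl_if_eq_foldl_filter,
    ← List.foldl_map (f := String.singleton)
      (g := fun (d : PySem.Dict String Int) k => d.insert k (d.getD k 0 + 1)),
    PySem.Dict.foldl_insert_getD_add_one_eq_counter,
    PySem.Dict.items_counter,
    filterMap_if_eq_map_filter,
    ofList_map_inj String.singleton singleton_injective,
    ofList_filter, ← PySem.List.dedup_eq_ofList,
    List.map_map]
  apply List.map_congr_left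
  intro c hc
  have hp : PySem.Chars.isalpha c = true := (List.mem_filter.mp hc).2
  simp only [Function.comp_apply]
  congr 1
  rw [List.count_map_of_injective _ _ singleton_injective, List.count_filter]
  simp [hp]
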